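-- pv_equiv track=rewrite | github.com/pypi-data/pypi-mirror-386 | packages/taxing/taxing-0.1.0-py3-none-any.whl/src/core/rules.py | dedupe_keywords
-- ===== SOURCE A (Python) =====
-- def dedupe_keywords(keywords: list[str]) -> list[str]:
--     """Remove subsumed keywords and duplicates.
--
--     Args:
--         keywords: List of keywords (case-insensitive)
--
--     Returns:
--         Deduplicated list, alphabetically sorted, with subsumed keywords removed
--     """
--     if not keywords:
--         return []
--
--     normalized = sorted({k.strip().upper() for k in keywords})
--
--     filtered = []
--     for kw in normalized:
--         if not any(kw != other and other in kw for other in normalized):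
--             filtered.append(kw)
--
--     return sorted(filtered)
-- ===== SOURCE B (Python) =====
-- def dedupe_keywords(keywords: list[str]) -> list[str]:
--     """Greedy antichain build: process normalized keywords in increasing length,
--     keeping a keyword only if no already-kept (necessarily minimal) keyword is a
--     substring of it; substring-minimality w.r.t. the whole set follows by
--     transitivity of the substring relation."""
--     normalized = {k.strip().upper() for k in keywords}
--     kept = []
--     for kw in sorted(normalized, key=len):
--         if not any(k in kw for k in kept):
--             kept.append(kw)
--     return sorted(kept)
-- ===== Notes on version B (the rewrite author's own statement) =====
-- stated objective: faster
-- what changed: Instead of testing every normalized keyword against every other keyword for substring containment, B processes the distinct normalized keywords in increasing length and keeps one only if no already-kept (minimal) keyword is a substring of it, greedily building the minimal antichain; correctness rests on transitivity of the substring relation.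
import Mathlib
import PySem

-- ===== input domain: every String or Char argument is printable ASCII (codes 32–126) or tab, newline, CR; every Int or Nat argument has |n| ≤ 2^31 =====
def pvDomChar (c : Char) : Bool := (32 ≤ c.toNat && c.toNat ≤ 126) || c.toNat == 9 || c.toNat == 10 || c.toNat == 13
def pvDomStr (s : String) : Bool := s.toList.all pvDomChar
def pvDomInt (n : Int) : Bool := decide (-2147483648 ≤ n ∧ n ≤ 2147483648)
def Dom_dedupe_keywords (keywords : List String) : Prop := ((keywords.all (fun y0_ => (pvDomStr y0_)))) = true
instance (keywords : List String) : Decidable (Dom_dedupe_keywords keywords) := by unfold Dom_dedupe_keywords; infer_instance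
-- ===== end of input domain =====

-- B replaces A's quadratic all-pairs substring scan by a greedy antichain build over the
-- length-sorted normalized set, testing each keyword only against the already-kept minimal ones.

-- ===== PORT A =====
def dedupe_keywords (keywords : List String) : List String :=
  if keywords = [] then []
  else
    let normalized := PySem.List.sorted
      (PySem.Set.ofList (keywords.map (fun k => PySem.Str.upper (PySem.Str.strip k))))
      (fun x => x)
    let filtered := normalized.foldl (fun acc kw =>
      if !(normalized.any (fun other => (kw != other) && PySem.Str.isIn other kw))
      then acc ++ [kw] else acc) []
    PySem.List.sorted filtered (fun x => x)

-- ===== PORT B =====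
def dedupe_keywords_alt (keywords : List String) : List String :=
  let normalized := PySem.Set.ofList (keywords.map (fun k => PySem.Str.upper (PySem.Str.strip k)))
  let kept := (PySem.List.sorted normalized (fun s => PySem.Str.len s)).foldl
    (fun kept kw =>
      if !(kept.any (fun k => PySem.Str.isIn k kw)) then kept ++ [kw] else kept) []
  PySem.List.sorted kept (fun x => x)

-- ===== PRECONDITION & SPEC =====
def Spec_dedupe_keywords (keywords : List String) (out : List String) : Prop := out = dedupe_keywords_alt keywords
instance (keywords : List String) (out : List String) : Decidable (Spec_dedupe_keywords keywords out) := by unfold Spec_dedupe_keywords; infer_instance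

-- ===== CLAIM (what is proved, stated in full; the proofs are below) =====
def Claim_equal_dedupe_keywords : Prop := ∀ (keywords : List String), Dom_dedupe_keywords keywords → Spec_dedupe_keywords keywords (dedupe_keywords keywords)

-- ===== LEMMAS AND PROOFS =====

-- kw is minimal in N: no other element of N is a substring of it (A's keep-condition, over N)
def pvMin (N : List String) (kw : String) : Bool :=
  !(N.any (fun o => (kw != o) && PySem.Str.isIn o kw))

theorem pvMin_true_iff (N : List String) (kw : String) :
    pvMin N kw = true ↔ ∀ o ∈ N, o ≠ kw → ¬ o.toList <:+: kw.toList := by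
  unfold pvMin
  rw [Bool.not_eq_true', List.any_eq_false]
  constructor
  · intro h o ho hne hinf
    have hfo := h o ho
    simp only [Bool.and_eq_true, bne_iff_ne, not_and] at hfo
    exact hfo (Ne.symm hne) ((PySem.Str.isIn_iff_infix o kw).mpr hinf)
  · intro h o ho
    simp only [Bool.and_eq_true, bne_iff_ne, not_and]
    intro hne hi
    exact h o ho (Ne.symm hne) ((PySem.Str.isIn_iff_infix o kw).mp hi)

theorem pvMin_false_iff (N : List String) (kw : String) :
    pvMin N kw = false ↔ ∃ o ∈ N, o ≠ kw ∧ o.toList <:+: kw.toList := by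
  rw [← Bool.not_eq_true, pvMin_true_iff]
  constructor
  · intro h
    by_contra hc
    exact h (fun o ho hne hinf => hc ⟨o, ho, hne, hinf⟩)
  · rintro ⟨o, ho, hne, hinf⟩ h
    exact h o ho hne hinf

theorem pvInfix_len_lt (o kw : String) (hne : o ≠ kw) (h : o.toList <:+: kw.toList) :
    o.toList.length < kw.toList.length :=
  lt_of_le_of_ne h.length_le
    (fun he => hne (String.toList_inj.mp (h.sublist.eq_of_length he)))

-- any strict substring of kw inside N dominates some MINIMAL strict substring of kw inside N
theorem pvExists_minimal_infix (N : List String) :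
    ∀ (n : Nat), ∀ (o kw : String), o.toList.length ≤ n → o ∈ N → o ≠ kw →
      o.toList <:+: kw.toList →
      ∃ m, m ∈ N ∧ pvMin N m = true ∧ m.toList <:+: kw.toList ∧
        m.toList.length < kw.toList.length := by
  intro n
  induction n using Nat.strong_induction_on with
  | _ n ih =>
    intro o kw hlen ho hne hinf
    by_cases hp : pvMin N o = true
    · exact ⟨o, ho, hp, hinf, pvInfix_len_lt o kw hne hinf⟩
    · obtain ⟨o', ho', hne', hinf'⟩ :=
        (pvMin_false_iff N o).mp (Bool.not_eq_true _ ▸ hp : pvMin N o = false)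
      have hlt' : o'.toList.length < o.toList.length := pvInfix_len_lt o' o hne' hinf'
      have hinfkw : o'.toList <:+: kw.toList := hinf'.trans hinf
      have hltkw : o.toList.length < kw.toList.length := pvInfix_len_lt o kw hne hinf
      have hnekw : o' ≠ kw := by
        intro he; subst he; omega
      exact ih o'.toList.length (by omega) o' kw le_rfl ho' hnekw hinfkw

-- the crux: against a prefix 'done' containing every strictly shorter element of N,
-- testing kw against the kept (minimal) elements decides exactly A's minimality of kw
theorem pvAny_filter_eq (N done : List String) (kw : String)
    (_hkwN : kw ∈ N) (hsub : ∀ x ∈ done, x ∈ N) (hkwd : kw ∉ done)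
    (hall : ∀ x ∈ N, x.toList.length < kw.toList.length → x ∈ done) :
    (done.filter (pvMin N)).any (fun k => PySem.Str.isIn k kw) = !(pvMin N kw) := by
  cases h : pvMin N kw with
  | true =>
    simp only [Bool.not_true]
    rw [List.any_eq_false]
    intro k hk
    rw [List.mem_filter] at hk
    have hkN := hsub k hk.1
    have hkne : k ≠ kw := fun he => hkwd (he ▸ hk.1)
    simp only [Bool.not_eq_true]
    rw [Bool.eq_false_iff]
    intro hi
    exact (pvMin_true_iff N kw).mp h k hkN hkne ((PySem.Str.isIn_iff_infix k kw).mp hi)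
  | false =>
    simp only [Bool.not_false]
    rw [List.any_eq_true]
    obtain ⟨o, ho, hne, hinf⟩ := (pvMin_false_iff N kw).mp h
    obtain ⟨m, hmN, hmMin, hmInf, hmLt⟩ :=
      pvExists_minimal_infix N o.toList.length o kw le_rfl ho hne hinf
    refine ⟨m, List.mem_filter.mpr ⟨hall m hmN hmLt, hmMin⟩, ?_⟩
    exact (PySem.Str.isIn_iff_infix m kw).mpr hmInf

theorem pvStrLen_eq (s : String) : PySem.Str.len s = (s.toList.length : Int) := by
  simp [PySem.Str.len_eq]

-- B's loop invariant: after processing a prefix of the length-sorted list, kept = prefix.filter (pvMin N)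
theorem pvFoldl_filter (N L : List String) (hperm : L.Perm N)
    (hpair : L.Pairwise (fun a b => PySem.Str.len a ≤ PySem.Str.len b)) (hnd : L.Nodup) :
    ∀ (rest done : List String), L = done ++ rest →
      rest.foldl (fun kept kw =>
          if !(kept.any (fun k => PySem.Str.isIn k kw)) then kept ++ [kw] else kept)
        (done.filter (pvMin N))
      = L.filter (pvMin N) := by
  intro rest
  induction rest with
  | nil => intro done hsplit; simp at hsplit; simp [hsplit, List.foldl_nil]
  | cons kw rest ih =>
    intro done hsplit
    have hkwL : kw ∈ L := by rw [hsplit]; simp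
    have hkwN : kw ∈ N := hperm.mem_iff.mp hkwL
    have hsub : ∀ x ∈ done, x ∈ N := fun x hx =>
      hperm.mem_iff.mp (by rw [hsplit]; exact List.mem_append_left _ hx)
    have hkwd : kw ∉ done := by
      intro hm
      have hnd' := hsplit ▸ hnd
      have hdisj := (List.nodup_append.mp hnd').2.2
      exact hdisj kw hm kw (List.mem_cons_self ..) rfl
    have hall : ∀ x ∈ N, x.toList.length < kw.toList.length → x ∈ done := by
      intro x hxN hxlt
      have hxL : x ∈ L := hperm.mem_iff.mpr hxN
      rw [hsplit] at hxL
      rcases List.mem_append.mp hxL with hd | hc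
      · exact hd
      · exfalso
        have hp := hsplit ▸ hpair
        have hp2 := (List.pairwise_append.mp hp).2.1
        rcases List.mem_cons.mp hc with he | hr
        · subst he; omega
        · have hle := List.rel_of_pairwise_cons hp2 hr
          rw [pvStrLen_eq, pvStrLen_eq] at hle
          omega
    have hstep : (if !((done.filter (pvMin N)).any (fun k => PySem.Str.isIn k kw))
          then done.filter (pvMin N) ++ [kw] else done.filter (pvMin N))
        = (done ++ [kw]).filter (pvMin N) := by
      rw [pvAny_filter_eq N done kw hkwN hsub hkwd hall, List.filter_append]
      cases hm : pvMin N kw <;> simp [hm]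
    rw [List.foldl_cons, hstep, ih (done ++ [kw]) (by rw [hsplit]; simp)]

theorem pvAny_perm {l₁ l₂ : List String} (h : l₁.Perm l₂) (f : String → Bool) :
    l₁.any f = l₂.any f := by
  cases ha : l₂.any f with
  | true =>
    obtain ⟨x, hx, hfx⟩ := List.any_eq_true.mp ha
    exact List.any_eq_true.mpr ⟨x, h.mem_iff.mpr hx, hfx⟩
  | false =>
    rw [List.any_eq_false] at ha ⊢
    exact fun x hx => ha x (h.mem_iff.mp hx)

-- ===== VERDICT (by name: the statement is the Claim_ definition above) =====
theorem dedupe_keywords_spec : Claim_equal_dedupe_keywords := by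
  intro keywords _
  unfold Spec_dedupe_keywords
  by_cases hk : keywords = []
  · subst hk; rfl
  · simp only [dedupe_keywords, dedupe_keywords_alt, if_neg hk]
    set N := PySem.Set.ofList (keywords.map (fun k => PySem.Str.upper (PySem.Str.strip k))) with hN
    have hNnd : N.Nodup := PySem.Set.nodup_ofList _
    set S := PySem.List.sorted N (fun x => x) with hS
    set L := PySem.List.sorted N (fun s => PySem.Str.len s) with hL
    have hSperm : S.Perm N := PySem.List.sorted_perm N _ false
    have hLperm : L.Perm N := PySem.List.sorted_perm N _ false
    have hLpair : L.Pairwise (fun a b => PySem.Str.len a ≤ PySem.Str.len b) :=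
      PySem.List.sorted_pairwise N _
    have hLnd : L.Nodup := hLperm.nodup_iff.mpr hNnd
    have hB : L.foldl (fun kept kw =>
          if !(kept.any (fun k => PySem.Str.isIn k kw)) then kept ++ [kw] else kept) []
        = L.filter (pvMin N) := by
      have := pvFoldl_filter N L hLperm hLpair hLnd L [] (by simp)
      simpa using this
    have hA : S.foldl (fun acc kw =>
          if !(S.any (fun other => (kw != other) && PySem.Str.isIn other kw))
          then acc ++ [kw] else acc) []
        = S.filter (pvMin N) := by
      rw [PySem.List.foldl_append_if_eq_filter]
      simp only [List.nil_append]
      apply List.filter_congr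
      intro kw _
      unfold pvMin
      rw [pvAny_perm hSperm]
    rw [hA, hB]
    exact PySem.List.sorted_eq_sorted_of_perm _ _ _ (fun a b h => h)
      ((hSperm.trans hLperm.symm).filter _)
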